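-- pv_equiv track=rewrite | github.com/GhermanCristian/Sem1_FP | Lab2/main - Copy.py | secondSequence
-- ===== SOURCE A (Python) =====
-- def getRealPart(com):
--     return com[0]
--
-- def getImagPart(com):
--     return com[1]
--
-- def modulus(com):
--     #returns the square of the modulus of the complex number "com"
--     #I use the square in order not to use sqrt and lose some precision
--     return getRealPart(com) ** 2 + getImagPart(com) ** 2
--
-- def modInRange(com):
--     #checks if the modulus of a complex number is in range [0, 10]
--     #returns a boolean value
--     return modulus(com) <= 100
--
-- def secondSequence(nrList):
--     length = len(nrList)
--     pos = 0
--     maxLength = 1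
--     answer = []
--
--     while pos < length:
--         while pos < length and not modInRange(nrList[pos]):
--             pos += 1
--
--         initPos = pos
--         while pos < length and modInRange(nrList[pos]):
--             pos += 1
--
--         if pos - initPos + 1 > maxLength:
--             maxLength = pos - initPos + 1
--             answer = nrList[initPos: pos]
--         pos += 1
--
--     return answer
-- ===== SOURCE B (Python) =====
-- def modInRange(com):
--     # modulus squared in [0, 100]  <=>  |com| <= 10
--     return com[0] ** 2 + com[1] ** 2 <= 100
--
--
-- def secondSequence(nrList):
--     # Right-to-left pass building the current in-range run back-to-front;
--     # '>=' makes the leftmost longest run survive, matching A's first-win rule.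
--     run = []
--     best = []
--     for com in reversed(nrList):
--         if modInRange(com):
--             run = [com] + run
--             if len(run) >= len(best):
--                 best = run
--         else:
--             run = []
--     return best
-- ===== Notes on version B (the rewrite author's own statement) =====
-- stated objective: alternative
-- what changed: Replaced A's left-to-right index arithmetic (nested while loops, maxLength counter, slicing out the answer) by a right-to-left pass that builds the current in-range run back-to-front element by element and keeps it with a '>=' comparison so the leftmost longest run survives; no indices or slices are used.
import Mathlib
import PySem

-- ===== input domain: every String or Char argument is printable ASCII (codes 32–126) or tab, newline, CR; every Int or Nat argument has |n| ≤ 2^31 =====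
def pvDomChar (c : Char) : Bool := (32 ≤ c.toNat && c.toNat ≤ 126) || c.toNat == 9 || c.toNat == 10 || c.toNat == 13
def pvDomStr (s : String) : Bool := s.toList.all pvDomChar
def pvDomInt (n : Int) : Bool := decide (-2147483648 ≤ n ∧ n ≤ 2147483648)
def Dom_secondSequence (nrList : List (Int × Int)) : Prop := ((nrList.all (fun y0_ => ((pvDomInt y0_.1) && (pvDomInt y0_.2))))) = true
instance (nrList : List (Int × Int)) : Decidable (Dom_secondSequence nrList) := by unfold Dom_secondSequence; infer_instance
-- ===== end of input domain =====

-- B replaces A's left-to-right index scanning (nested while loops, maxLength, slicing)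
-- by a right-to-left pass that builds the current run back-to-front and keeps the
-- leftmost longest via '>=' (alternative decomposition; no indices or slices).

-- ===== PORT A =====
def pvGetRealPart (com : Int × Int) : Int := com.1

def pvGetImagPart (com : Int × Int) : Int := com.2

def pvModulus (com : Int × Int) : Int := pvGetRealPart com ^ 2 + pvGetImagPart com ^ 2

def pvModInRange (com : Int × Int) : Bool := pvModulus com ≤ 100

-- first inner while: skip elements whose modulus is out of range
def pvASkip (nrList : List (Int × Int)) (pos : Int) : Int :=
  if h : pos < nrList.length ∧ pvModInRange (PySem.List.pyGetD nrList pos (0, 0)) = false then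
    pvASkip nrList (pos + 1)
  else pos
termination_by ((nrList.length : Int) - pos).toNat
decreasing_by have := h.1; omega

-- second inner while: advance over elements whose modulus is in range
def pvATake (nrList : List (Int × Int)) (pos : Int) : Int :=
  if h : pos < nrList.length ∧ pvModInRange (PySem.List.pyGetD nrList pos (0, 0)) = true then
    pvATake nrList (pos + 1)
  else pos
termination_by ((nrList.length : Int) - pos).toNat
decreasing_by have := h.1; omega

theorem pvASkip_ge (nrList : List (Int × Int)) (pos : Int) : pos ≤ pvASkip nrList pos := by
  unfold pvASkip
  split
  · have := pvASkip_ge nrList (pos + 1); omega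
  · omega
termination_by ((nrList.length : Int) - pos).toNat
decreasing_by rename_i h; have := h.1; omega

theorem pvATake_ge (nrList : List (Int × Int)) (pos : Int) : pos ≤ pvATake nrList pos := by
  unfold pvATake
  split
  · have := pvATake_ge nrList (pos + 1); omega
  · omega
termination_by ((nrList.length : Int) - pos).toNat
decreasing_by rename_i h; have := h.1; omega

-- outer while loop of A, state (pos, maxLength, answer); initPos = pvASkip nrList pos
-- and the position after the second inner while = pvATake nrList (pvASkip nrList pos)
def pvALoop (nrList : List (Int × Int)) (pos maxLength : Int) (answer : List (Int × Int)) :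
    List (Int × Int) :=
  if h : pos < nrList.length then
    if pvATake nrList (pvASkip nrList pos) - pvASkip nrList pos + 1 > maxLength then
      pvALoop nrList (pvATake nrList (pvASkip nrList pos) + 1)
        (pvATake nrList (pvASkip nrList pos) - pvASkip nrList pos + 1)
        (PySem.List.slice nrList (some (pvASkip nrList pos))
          (some (pvATake nrList (pvASkip nrList pos))))
    else
      pvALoop nrList (pvATake nrList (pvASkip nrList pos) + 1) maxLength answer
  else answer
termination_by ((nrList.length : Int) + 1 - pos).toNat
decreasing_by
  all_goals
    have h1 := pvASkip_ge nrList pos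
    have h2 := pvATake_ge nrList (pvASkip nrList pos)
    omega

def secondSequence (nrList : List (Int × Int)) : List (Int × Int) :=
  pvALoop nrList 0 1 []

-- ===== PORT B =====
-- body of Source B's 'for com in reversed(nrList)' loop, state (run, best)
def pvBStep (s : List (Int × Int) × List (Int × Int)) (com : Int × Int) :
    List (Int × Int) × List (Int × Int) :=
  if pvModInRange com then
    let run2 := com :: s.1
    (run2, if s.2.length ≤ run2.length then run2 else s.2)
  else ([], s.2)

def secondSequence_alt (nrList : List (Int × Int)) : List (Int × Int) :=
  (nrList.reverse.foldl pvBStep ([], [])).2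

-- ===== PRECONDITION & SPEC =====
def Spec_secondSequence (nrList : List (Int × Int)) (out : List (Int × Int)) : Prop := out = secondSequence_alt nrList
instance (nrList : List (Int × Int)) (out : List (Int × Int)) : Decidable (Spec_secondSequence nrList out) := by unfold Spec_secondSequence; infer_instance

-- ===== CLAIM (what is proved, stated in full; the proofs are below) =====
def Claim_equal_secondSequence : Prop := ∀ (nrList : List (Int × Int)), Dom_secondSequence nrList → Spec_secondSequence nrList (secondSequence nrList)

-- ===== LEMMAS AND PROOFS =====

-- the list of maximal in-range runs, and A's "keep first strictly longest" step
def pvRuns : List (Int × Int) → List (List (Int × Int))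
  | [] => []
  | x :: xs =>
    if pvModInRange x then
      (x :: xs.takeWhile pvModInRange) :: pvRuns (xs.dropWhile pvModInRange)
    else pvRuns xs
termination_by l => l.length
decreasing_by
  · have := List.length_dropWhile_le pvModInRange xs; simp; omega
  · simp

def pvStep (b g : List (Int × Int)) : List (Int × Int) :=
  if g.length > b.length then g else b

-- B's right-fold over the runs: keeps a run when its length is ≥ the best so far
def pvBestR (rs : List (List (Int × Int))) : List (Int × Int) :=
  rs.foldr (fun g b => if b.length ≤ g.length then g else b) []

theorem pvRuns_dropWhile_not (l : List (Int × Int)) :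
    pvRuns (l.dropWhile (fun y => !pvModInRange y)) = pvRuns l := by
  induction l with
  | nil => rfl
  | cons x xs ih =>
    by_cases hx : pvModInRange x = true
    · simp [List.dropWhile_cons, hx]
    · simp only [Bool.not_eq_true] at hx
      simp [List.dropWhile_cons, hx, pvRuns, ih]

theorem pvHead_dropWhile {p : Int × Int → Bool} {l : List (Int × Int)} {x : Int × Int}
    {xs : List (Int × Int)} (h : l.dropWhile p = x :: xs) : p x = false := by
  induction l with
  | nil => simp at h
  | cons a as ih =>
    rw [List.dropWhile_cons] at h
    split at h
    · exact ih h
    · rename_i hpa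
      cases h
      simpa using hpa

theorem pvDrop_length_takeWhile (p : Int × Int → Bool) (l : List (Int × Int)) :
    l.drop (l.takeWhile p).length = l.dropWhile p := by
  induction l with
  | nil => rfl
  | cons x xs ih =>
    by_cases hx : p x = true
    · simp [List.takeWhile_cons, List.dropWhile_cons, hx, ih]
    · simp [List.takeWhile_cons, List.dropWhile_cons, hx]

theorem pvBestR_cons (a : List (Int × Int)) (rs : List (List (Int × Int))) :
    pvBestR (a :: rs) = if (pvBestR rs).length ≤ a.length then a else pvBestR rs := rfl

-- appending an in-range element in front: the best over the runs of x :: xs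
theorem pvBestR_cons_run (x : Int × Int) (xs : List (Int × Int))
    (hx : pvModInRange x = true) :
    pvBestR (pvRuns (x :: xs))
      = if (pvBestR (pvRuns xs)).length ≤ (xs.takeWhile pvModInRange).length + 1
        then x :: xs.takeWhile pvModInRange else pvBestR (pvRuns xs) := by
  have hA : pvRuns (x :: xs)
      = (x :: xs.takeWhile pvModInRange) :: pvRuns (xs.dropWhile pvModInRange) := by
    rw [pvRuns, if_pos hx]
  rw [hA, pvBestR_cons]
  cases xs with
  | nil => simp [pvRuns, pvBestR]
  | cons y ys =>
    by_cases hy : pvModInRange y = true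
    · have hd : List.dropWhile pvModInRange (y :: ys) = ys.dropWhile pvModInRange := by
        simp [List.dropWhile_cons, hy]
      have ht : List.takeWhile pvModInRange (y :: ys) = y :: ys.takeWhile pvModInRange := by
        simp [List.takeWhile_cons, hy]
      have hB : pvRuns (y :: ys)
          = (y :: ys.takeWhile pvModInRange) :: pvRuns (ys.dropWhile pvModInRange) := by
        rw [pvRuns, if_pos hy]
      rw [hd, ht, hB, pvBestR_cons]
      simp only [List.length_cons]
      split_ifs <;> first | rfl | (exfalso; simp only [List.length_cons] at *; omega)
    · have hd : List.dropWhile pvModInRange (y :: ys) = y :: ys := by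
        simp [List.dropWhile_cons, hy]
      rw [hd]
      simp only [List.length_cons]
      split_ifs <;> first | rfl | (exfalso; simp only [List.length_cons] at *; omega)

-- B's reversed-loop fold computes (current run = in-range prefix, pvBestR of the runs)
theorem pvBFoldr_spec (l : List (Int × Int)) :
    l.foldr (fun x s => pvBStep s x) ([], [])
      = (l.takeWhile pvModInRange, pvBestR (pvRuns l)) := by
  induction l with
  | nil => simp [pvBestR, pvRuns]
  | cons x xs ih =>
    rw [List.foldr_cons, ih]
    by_cases hx : pvModInRange x = true
    · rw [pvBStep, if_pos hx]
      have ht : List.takeWhile pvModInRange (x :: xs) = x :: xs.takeWhile pvModInRange := by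
        simp [List.takeWhile_cons, hx]
      have hlen : (x :: xs.takeWhile pvModInRange).length
          = (xs.takeWhile pvModInRange).length + 1 := rfl
      rw [ht, pvBestR_cons_run x xs hx]
      simp only [hlen]
    · simp only [Bool.not_eq_true] at hx
      rw [pvBStep, if_neg (by simp [hx])]
      rw [List.takeWhile_cons, hx]
      simp only [Bool.false_eq_true, if_false]
      rw [pvRuns, if_neg (by simp [hx])]

-- A's left fold with '>' over the runs equals B's right fold with '≥'
theorem pvFoldl_pvStep_eq (rs : List (List (Int × Int))) (b : List (Int × Int)) :
    rs.foldl pvStep b = if (pvBestR rs).length > b.length then pvBestR rs else b := by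
  induction rs generalizing b with
  | nil =>
    simp [pvBestR]
  | cons g gs ih =>
    rw [List.foldl_cons, ih, pvBestR_cons, pvStep]
    split_ifs <;> first | rfl | (exfalso; simp only [List.length_cons] at *; omega)

theorem pvASkip_spec (nrList : List (Int × Int)) (pos : Int) (h0 : 0 ≤ pos) :
    pvASkip nrList pos
      = pos + ((nrList.drop pos.toNat).takeWhile (fun y => !pvModInRange y)).length := by
  rw [pvASkip]
  by_cases h : pos < nrList.length ∧ pvModInRange (PySem.List.pyGetD nrList pos (0, 0)) = false
  · rw [dif_pos h]
    have hlt : pos.toNat < nrList.length := by omega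
    have hdrop := List.drop_eq_getElem_cons hlt
    have hget : PySem.List.pyGetD nrList pos (0, 0) = nrList[pos.toNat] :=
      PySem.List.pyGetD_eq_getElem nrList (0, 0) h0 h.1
    have hrec := pvASkip_spec nrList (pos + 1) (by omega)
    rw [hrec, hdrop, List.takeWhile_cons]
    have ht : (pos + 1).toNat = pos.toNat + 1 := by omega
    rw [← hget]
    simp [h.2, ht]
    omega
  · rw [dif_neg h]
    push_neg at h
    by_cases hl : pos < (nrList.length : Int)
    · have hfalse := h hl
      have hlt : pos.toNat < nrList.length := by omega
      have hdrop := List.drop_eq_getElem_cons hlt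
      have hget : PySem.List.pyGetD nrList pos (0, 0) = nrList[pos.toNat] :=
        PySem.List.pyGetD_eq_getElem nrList (0, 0) h0 hl
      rw [hdrop, List.takeWhile_cons, ← hget]
      simp [hfalse]
    · rw [List.drop_eq_nil_of_le (by omega)]
      simp
termination_by ((nrList.length : Int) - pos).toNat
decreasing_by have := h.1; omega

theorem pvATake_spec (nrList : List (Int × Int)) (pos : Int) (h0 : 0 ≤ pos) :
    pvATake nrList pos
      = pos + ((nrList.drop pos.toNat).takeWhile pvModInRange).length := by
  rw [pvATake]
  by_cases h : pos < nrList.length ∧ pvModInRange (PySem.List.pyGetD nrList pos (0, 0)) = true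
  · rw [dif_pos h]
    have hlt : pos.toNat < nrList.length := by omega
    have hdrop := List.drop_eq_getElem_cons hlt
    have hget : PySem.List.pyGetD nrList pos (0, 0) = nrList[pos.toNat] :=
      PySem.List.pyGetD_eq_getElem nrList (0, 0) h0 h.1
    have hrec := pvATake_spec nrList (pos + 1) (by omega)
    rw [hrec, hdrop, List.takeWhile_cons]
    have ht : (pos + 1).toNat = pos.toNat + 1 := by omega
    rw [← hget]
    simp [h.2, ht]
    omega
  · rw [dif_neg h]
    push_neg at h
    by_cases hl : pos < (nrList.length : Int)
    · have hfalse := h hl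
      have hlt : pos.toNat < nrList.length := by omega
      have hdrop := List.drop_eq_getElem_cons hlt
      have hget : PySem.List.pyGetD nrList pos (0, 0) = nrList[pos.toNat] :=
        PySem.List.pyGetD_eq_getElem nrList (0, 0) h0 hl
      rw [hdrop, List.takeWhile_cons, ← hget]
      simp [hfalse]
    · rw [List.drop_eq_nil_of_le (by omega)]
      simp
termination_by ((nrList.length : Int) - pos).toNat
decreasing_by have := h.1; omega

theorem pvALoop_spec (nrList : List (Int × Int)) (pos : Int) (ans : List (Int × Int))
    (h0 : 0 ≤ pos) :
    pvALoop nrList pos ((ans.length : Int) + 1) ans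
      = (pvRuns (nrList.drop pos.toNat)).foldl pvStep ans := by
  rw [pvALoop]
  by_cases hl : pos < (nrList.length : Int)
  case neg =>
    rw [dif_neg hl, List.drop_eq_nil_of_le (by omega)]
    simp [pvRuns]
  rw [dif_pos hl]
  have hiv : pvASkip nrList pos
      = pos + ((nrList.drop pos.toNat).takeWhile (fun y => !pvModInRange y)).length :=
    pvASkip_spec nrList pos h0
  have hi0 : 0 ≤ pvASkip nrList pos := le_trans h0 (pvASkip_ge nrList pos)
  have hdi : nrList.drop (pvASkip nrList pos).toNat
      = (nrList.drop pos.toNat).dropWhile (fun y => !pvModInRange y) := by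
    have h1 : (pvASkip nrList pos).toNat
        = pos.toNat + ((nrList.drop pos.toNat).takeWhile (fun y => !pvModInRange y)).length := by
      omega
    rw [h1, ← List.drop_drop, pvDrop_length_takeWhile]
  have hp2v : pvATake nrList (pvASkip nrList pos)
      = pvASkip nrList pos
        + (((nrList.drop pos.toNat).dropWhile (fun y => !pvModInRange y)).takeWhile
            pvModInRange).length := by
    rw [pvATake_spec nrList _ hi0, hdi]
  have hp20 : 0 ≤ pvATake nrList (pvASkip nrList pos) := le_trans hi0 (pvATake_ge nrList _)
  have hdp2 : nrList.drop (pvATake nrList (pvASkip nrList pos)).toNat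
      = ((nrList.drop pos.toNat).dropWhile (fun y => !pvModInRange y)).dropWhile pvModInRange := by
    have h1 : (pvATake nrList (pvASkip nrList pos)).toNat
        = (pvASkip nrList pos).toNat
          + (((nrList.drop pos.toNat).dropWhile (fun y => !pvModInRange y)).takeWhile
              pvModInRange).length := by
      omega
    rw [h1, ← List.drop_drop, hdi, pvDrop_length_takeWhile]
  have hslice : PySem.List.slice nrList (some (pvASkip nrList pos))
        (some (pvATake nrList (pvASkip nrList pos)))
      = ((nrList.drop pos.toNat).dropWhile (fun y => !pvModInRange y)).takeWhile pvModInRange := by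
    rw [PySem.List.slice_toNat nrList hi0 hp20]
    have h1 : (pvATake nrList (pvASkip nrList pos)).toNat - (pvASkip nrList pos).toNat
        = (((nrList.drop pos.toNat).dropWhile (fun y => !pvModInRange y)).takeWhile
            pvModInRange).length := by
      omega
    rw [h1, hdi]
    exact (List.prefix_iff_eq_take.mp (List.takeWhile_prefix _)).symm
  have hruns_t : pvRuns (nrList.drop pos.toNat)
      = pvRuns ((nrList.drop pos.toNat).dropWhile (fun y => !pvModInRange y)) :=
    (pvRuns_dropWhile_not _).symm
  have hnext : pvRuns (nrList.drop (pvATake nrList (pvASkip nrList pos) + 1).toNat)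
      = pvRuns (((nrList.drop pos.toNat).dropWhile (fun y => !pvModInRange y)).dropWhile
          pvModInRange) := by
    have h1 : (pvATake nrList (pvASkip nrList pos) + 1).toNat
        = (pvATake nrList (pvASkip nrList pos)).toNat + 1 := by omega
    rw [h1, ← List.tail_drop, hdp2]
    cases hcase : ((nrList.drop pos.toNat).dropWhile (fun y => !pvModInRange y)).dropWhile
        pvModInRange with
    | nil => simp
    | cons z zs =>
      have hz := pvHead_dropWhile hcase
      simp [pvRuns, hz]
  cases hucase : (nrList.drop pos.toNat).dropWhile (fun y => !pvModInRange y) with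
  | nil =>
    rw [hucase] at hp2v hnext hruns_t
    simp only [List.takeWhile_nil, List.length_nil, Nat.cast_zero, add_zero] at hp2v
    have hcond : ¬ (pvATake nrList (pvASkip nrList pos) - pvASkip nrList pos + 1
        > (ans.length : Int) + 1) := by omega
    rw [if_neg hcond, pvALoop_spec nrList _ ans (by omega), hnext, hruns_t]
    simp [pvRuns]
  | cons y ys =>
    have hy : pvModInRange y = true := by
      have := pvHead_dropWhile hucase
      simpa using this
    rw [hucase] at hp2v hslice hruns_t hnext
    have htw : (y :: ys).takeWhile pvModInRange = y :: ys.takeWhile pvModInRange := by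
      simp [List.takeWhile_cons, hy]
    have hdw : (y :: ys).dropWhile pvModInRange = ys.dropWhile pvModInRange := by
      simp [List.dropWhile_cons, hy]
    have hrunsu : pvRuns (y :: ys)
        = ((y :: ys).takeWhile pvModInRange) :: pvRuns ((y :: ys).dropWhile pvModInRange) := by
      rw [pvRuns, if_pos hy, ← htw, hdw]
    by_cases hc : pvATake nrList (pvASkip nrList pos) - pvASkip nrList pos + 1
        > (ans.length : Int) + 1
    · rw [if_pos hc]
      have hlen : pvATake nrList (pvASkip nrList pos) - pvASkip nrList pos + 1
          = (((y :: ys).takeWhile pvModInRange).length : Int) + 1 := by omega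
      rw [hlen, hslice, pvALoop_spec nrList _ _ (by omega), hnext, hruns_t, hrunsu,
        List.foldl_cons, hdw]
      have hstep : pvStep ans ((y :: ys).takeWhile pvModInRange)
          = (y :: ys).takeWhile pvModInRange := by
        rw [pvStep, if_pos (by omega)]
      rw [hstep]
    · rw [if_neg hc, pvALoop_spec nrList _ ans (by omega), hnext, hruns_t, hrunsu,
        List.foldl_cons, hdw]
      have hstep : pvStep ans ((y :: ys).takeWhile pvModInRange) = ans := by
        rw [pvStep, if_neg (by omega)]
      rw [hstep]
termination_by ((nrList.length : Int) + 1 - pos).toNat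
decreasing_by
  all_goals
    have h1 := pvASkip_ge nrList pos
    have h2 := pvATake_ge nrList (pvASkip nrList pos)
    omega

-- ===== VERDICT (by name: the statement is the Claim_ definition above) =====
theorem secondSequence_spec : Claim_equal_secondSequence := by
  intro nrList _
  unfold Spec_secondSequence secondSequence secondSequence_alt
  rw [List.foldl_reverse]
  have hB : (nrList.foldr (fun x s => pvBStep s x) ([], [])).2 = pvBestR (pvRuns nrList) := by
    rw [pvBFoldr_spec]
  have hA : pvALoop nrList 0 1 [] = (pvRuns nrList).foldl pvStep [] := by
    have h := pvALoop_spec nrList 0 [] (le_refl 0)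
    simpa using h
  rw [hA, hB, pvFoldl_pvStep_eq]
  by_cases h : (pvBestR (pvRuns nrList)).length > ([] : List (Int × Int)).length
  · rw [if_pos h]
  · rw [if_neg h]
    simp only [List.length_nil, Nat.not_lt, Nat.le_zero] at h
    exact (List.length_eq_zero_iff.mp h).symm
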